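-- pv_equiv track=rewrite | github.com/farahhossam2004/N-Puzzle-AI | heioristic_Function.py | misplaced_tiles_with_constraints
-- ===== SOURCE A (Python) =====
-- def misplaced_tiles_with_constraints(board, size):
--     number_of_places = 0
--     row_column_penalty = 0
--
--     # Initialize the correct board
--     correct_board = [[0] * size for _ in range(size)]
--
--     tilesplaceholder = 1
--     for i in range(size):
--         for j in range(size):
--             if i == size - 1 and j == size - 1:  # Last element should be 0
--                 correct_board[i][j] = 0
--             else:
--                 correct_board[i][j] = tilesplaceholder
--                 tilesplaceholder += 1
--
--     for i in range(len(board)):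
--         for j in range(len(board[i])):
--             current_value = board[i][j]
--             if current_value != correct_board[i][j]:
--                 number_of_places += 1
--
--                 # Find the correct position of the current tile
--                 correct_i, correct_j = None, None
--                 for x in range(size):
--                     for y in range(size):
--                         if correct_board[x][y] == current_value:
--                             correct_i, correct_j = x, y
--                             break
--                     if correct_i is not None:
--                         break
--
--                 # Check if the tile is in the correct row but wrong column
--                 if i == correct_i and j != correct_j:
--                     row_column_penalty += 1
--
--                 # Check if the tile is in the correct column but wrong row
--                 if j == correct_j and i != correct_i:
--                     row_column_penalty += 1
--
--     return number_of_places + row_column_penalty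
-- ===== SOURCE B (Python) =====
-- def misplaced_tiles_with_constraints(board, size):
--     # Same heuristic value, computed in one pass: the goal position of each
--     # tile follows from arithmetic (divmod) instead of scanning a goal board.
--     total = 0
--     for i, row in enumerate(board):
--         for j, v in enumerate(row):
--             goal = 0 if (i == size - 1 and j == size - 1) else i * size + j + 1
--             if v != goal:
--                 total += 1
--                 if v == 0:
--                     ci, cj = size - 1, size - 1
--                 elif 1 <= v <= size * size - 1:
--                     ci, cj = divmod(v - 1, size)
--                 else:
--                     continue
--                 if i == ci and j != cj:
--                     total += 1
--                 if j == cj and i != ci: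
--                     total += 1
--     return total
-- ===== Notes on version B (the rewrite author's own statement) =====
-- stated objective: faster
-- what changed: B drops A's goal-board construction and its per-mismatch O(size^2) row-major scan: the goal value and the goal position of each tile are computed by arithmetic (divmod) in a single pass over the board.
import Mathlib
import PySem

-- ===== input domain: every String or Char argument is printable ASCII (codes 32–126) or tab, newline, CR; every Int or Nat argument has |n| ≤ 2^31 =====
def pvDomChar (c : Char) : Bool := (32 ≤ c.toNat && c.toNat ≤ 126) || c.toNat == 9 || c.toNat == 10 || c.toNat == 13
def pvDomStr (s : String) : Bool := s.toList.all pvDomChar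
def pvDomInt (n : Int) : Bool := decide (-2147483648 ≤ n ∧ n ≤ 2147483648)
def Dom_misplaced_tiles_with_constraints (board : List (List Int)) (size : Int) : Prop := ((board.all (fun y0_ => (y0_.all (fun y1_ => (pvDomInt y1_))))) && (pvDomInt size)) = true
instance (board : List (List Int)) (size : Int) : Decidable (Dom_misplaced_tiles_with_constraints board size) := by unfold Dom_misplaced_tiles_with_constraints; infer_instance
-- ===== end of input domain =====

-- B computes each tile's goal value and goal position arithmetically (divmod) in one pass,
-- instead of A's goal-board construction plus per-mismatch row-major scan: asymptotically faster.


-- ===== PORT A =====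

-- one iteration of A's row-building loop over j in range(size)
def pvBuildRow (size : Int) (i : Int) (st : List (List Int) × Int) : List (List Int) × Int :=
  (PySem.List.pyRange 0 size 1).foldl (fun st j =>
    if i = size - 1 ∧ j = size - 1 then
      (PySem.List.pySetD st.1 i (PySem.List.pySetD (PySem.List.pyGetD st.1 i []) j 0), st.2)
    else
      (PySem.List.pySetD st.1 i (PySem.List.pySetD (PySem.List.pyGetD st.1 i []) j st.2), st.2 + 1)) st

-- A's correct_board: [[0]*size for _ in range(size)], then filled cell by cell with tilesplaceholder
def pvBuild (size : Int) : List (List Int) :=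
  ((PySem.List.pyRange 0 size 1).foldl (fun st i => pvBuildRow size i st)
    ((PySem.List.pyRange 0 size 1).map (fun _ => List.replicate size.toNat 0), 1)).1

-- A's inner search: for x in range(size): for y in range(size): … break on first hit
def pvFindPos (cb : List (List Int)) (size : Int) (v : Int) : Option (Int × Int) :=
  (PySem.List.pyRange 0 size 1).foldl (fun acc x =>
    match acc with
    | some r => some r
    | none =>
      (PySem.List.pyRange 0 size 1).foldl (fun acc2 y =>
        match acc2 with
        | some r => some r
        | none =>
          if PySem.List.pyGetD (PySem.List.pyGetD cb x []) y 0 = v then some (x, y) else none)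
        none) none

def misplaced_tiles_with_constraints (board : List (List Int)) (size : Int) : Int :=
  let correct_board := pvBuild size
  let st := (PySem.List.enumerate board).foldl (fun (st : Int × Int) p =>
    (PySem.List.enumerate p.2).foldl (fun (st : Int × Int) q =>
      if q.2 ≠ PySem.List.pyGetD (PySem.List.pyGetD correct_board p.1 []) q.1 0 then
        (st.1 + 1,
         st.2 + (match pvFindPos correct_board size q.2 with
                 | none => 0
                 | some (ci, cj) =>
                   (if p.1 = ci ∧ q.1 ≠ cj then 1 else 0) +
                   (if q.1 = cj ∧ p.1 ≠ ci then 1 else 0)))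
      else st) st) (0, 0)
  st.1 + st.2

-- ===== PORT B =====
def misplaced_tiles_with_constraints_alt (board : List (List Int)) (size : Int) : Int :=
  (PySem.List.enumerate board).foldl (fun tot p =>
    (PySem.List.enumerate p.2).foldl (fun tot q =>
      let goal : Int := if p.1 = size - 1 ∧ q.1 = size - 1 then 0 else p.1 * size + q.1 + 1
      if q.2 ≠ goal then
        tot + 1 +
          (if q.2 = 0 then
            (if p.1 = size - 1 ∧ q.1 ≠ size - 1 then 1 else 0) +
            (if q.1 = size - 1 ∧ p.1 ≠ size - 1 then 1 else 0)
          else if 1 ≤ q.2 ∧ q.2 ≤ size * size - 1 then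
            (if p.1 = PySem.Int.floordiv (q.2 - 1) size ∧ q.1 ≠ PySem.Int.mod (q.2 - 1) size then 1 else 0) +
            (if q.1 = PySem.Int.mod (q.2 - 1) size ∧ p.1 ≠ PySem.Int.floordiv (q.2 - 1) size then 1 else 0)
          else 0)
      else tot) tot) 0

-- ===== PRECONDITION & SPEC =====
-- A raises IndexError on correct_board exactly when some NONEMPTY row sits at an index ≥ size
-- or is longer than size; Pre_ excludes exactly those inputs.
def Pre_misplaced_tiles_with_constraints (board : List (List Int)) (size : Int) : Prop :=
  ∀ p ∈ PySem.List.enumerate board, p.2 ≠ [] → p.1 < size ∧ (p.2.length : Int) ≤ size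
instance (board : List (List Int)) (size : Int) : Decidable (Pre_misplaced_tiles_with_constraints board size) := by unfold Pre_misplaced_tiles_with_constraints; infer_instance
def pvWitness_misplaced_tiles_with_constraints : List (List Int) × Int := ([[1, 0], [3, 2]], 2)

def Spec_misplaced_tiles_with_constraints (board : List (List Int)) (size : Int) (out : Int) : Prop := out = misplaced_tiles_with_constraints_alt board size
instance (board : List (List Int)) (size : Int) (out : Int) : Decidable (Spec_misplaced_tiles_with_constraints board size out) := by unfold Spec_misplaced_tiles_with_constraints; infer_instance

-- ===== CLAIM (what is proved, stated in full; the proofs are below) =====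
def Claim_equal_misplaced_tiles_with_constraints : Prop := ∀ (board : List (List Int)) (size : Int), Dom_misplaced_tiles_with_constraints board size → Pre_misplaced_tiles_with_constraints board size → Spec_misplaced_tiles_with_constraints board size (misplaced_tiles_with_constraints board size)

-- ===== LEMMAS AND PROOFS =====

-- the value A's goal board holds at cell (i, j)
def rowF (size i j : Int) : Int := if i = size - 1 ∧ j = size - 1 then 0 else i * size + j + 1

-- goal board rows fully built for i < m, untouched (all-zero) from m on
def cbAt (size m : Int) : List (List Int) :=
  (PySem.List.pyRange 0 size 1).map (fun i =>
    if i < m then (PySem.List.pyRange 0 size 1).map (rowF size i)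
    else List.replicate size.toNat 0)

-- row i built up to column j, zeros afterwards
def rowAt (size i j : Int) : List Int :=
  (PySem.List.pyRange 0 size 1).map (fun y => if y < j then rowF size i y else 0)

-- the board during the processing of row i, columns < j done
def cbRowAt (size i j : Int) : List (List Int) :=
  (PySem.List.pyRange 0 size 1).map (fun x =>
    if x < i then (PySem.List.pyRange 0 size 1).map (rowF size x)
    else if x = i then rowAt size i j
    else List.replicate size.toNat 0)

-- tilesplaceholder after processing row i up to column j
def tAt (size i j : Int) : Int :=
  i * size + j + 1 - (if i = size - 1 ∧ j = size then 1 else 0)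

lemma set_map_pyRange {α : Type} (f : Int → α) (n i : Int) (v : α) (h0 : 0 ≤ i) (_hn : i < n) :
    ((PySem.List.pyRange 0 n 1).map f).set i.toNat v
      = (PySem.List.pyRange 0 n 1).map (fun x => if x = i then v else f x) := by
  apply List.ext_getElem
  · simp
  · intro k h1 h2
    simp only [List.getElem_set, List.getElem_map, PySem.List.getElem_pyRange_one]
    by_cases h : i.toNat = k
    · rw [if_pos h, if_pos (by omega)]
    · rw [if_neg h, if_neg (by omega)]

lemma rowAt_zero (size i : Int) : rowAt size i 0 = List.replicate size.toNat 0 := by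
  unfold rowAt
  have h : ∀ y ∈ PySem.List.pyRange 0 size 1, (if y < 0 then rowF size i y else 0) = (0 : Int) := by
    intro y hy
    rw [PySem.List.mem_pyRange_one] at hy
    rw [if_neg (by omega)]
  rw [List.map_congr_left h, List.map_const']
  rw [PySem.List.length_pyRange_one]
  norm_num

lemma cbRow_update (size i j : Int) (h0 : 0 ≤ i) (hi : i < size) (hj0 : 0 ≤ j) (hj : j < size)
    (v : Int) (hv : v = rowF size i j) :
    PySem.List.pySetD (cbRowAt size i j) i
      (PySem.List.pySetD (PySem.List.pyGetD (cbRowAt size i j) i []) j v)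
      = cbRowAt size i (j + 1) := by
  have hrow : PySem.List.pyGetD (cbRowAt size i j) i [] = rowAt size i j := by
    unfold cbRowAt
    rw [PySem.List.pyGetD_map_pyRange_of_nonneg _ _ _ _ h0 hi]
    simp
  rw [hrow]
  have hset : PySem.List.pySetD (rowAt size i j) j v = rowAt size i (j + 1) := by
    unfold rowAt
    rw [PySem.List.pySetD_of_nonneg _ _ hj0, set_map_pyRange _ _ _ _ hj0 hj]
    apply List.map_congr_left
    intro y hy
    rw [PySem.List.mem_pyRange_one] at hy
    by_cases h : y = j
    · subst h; rw [if_pos rfl, if_pos (by omega), hv]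
    · rw [if_neg h]
      by_cases h2 : y < j
      · rw [if_pos h2, if_pos (by omega)]
      · rw [if_neg h2, if_neg (by omega)]
  rw [hset]
  unfold cbRowAt
  rw [PySem.List.pySetD_of_nonneg _ _ h0, set_map_pyRange _ _ _ _ h0 hi]
  apply List.map_congr_left
  intro x hx
  by_cases h : x = i
  · subst h; simp
  · simp [h]

lemma build_row_step (size i : Int) (h0 : 0 ≤ i) (hi : i < size) (j : Nat)
    (hj : (j : Int) ≤ size) :
    (PySem.List.pyRange 0 (j : Int) 1).foldl (fun st jj =>
      if i = size - 1 ∧ jj = size - 1 then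
        (PySem.List.pySetD st.1 i (PySem.List.pySetD (PySem.List.pyGetD st.1 i []) jj 0), st.2)
      else
        (PySem.List.pySetD st.1 i (PySem.List.pySetD (PySem.List.pyGetD st.1 i []) jj st.2), st.2 + 1))
      (cbRowAt size i 0, tAt size i 0)
    = (cbRowAt size i j, tAt size i j) := by
  induction j with
  | zero =>
    rw [show ((0 : Nat) : Int) = 0 by norm_num, PySem.List.pyRange_one_eq_nil (by omega)]
    rfl
  | succ j ih =>
    have hj' : (j : Int) ≤ size := by push_cast at hj ⊢; omega
    have hjlt : (j : Int) < size := by push_cast at hj; omega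
    rw [show ((j + 1 : Nat) : Int) = (j : Int) + 1 by push_cast; ring,
        PySem.List.pyRange_one_succ_right (by omega), List.foldl_append, ih hj']
    simp only [List.foldl_cons, List.foldl_nil]
    by_cases hlast : i = size - 1 ∧ (j : Int) = size - 1
    · rw [if_pos hlast]
      have hcb := cbRow_update size i (j : Int) h0 hi (by omega) hjlt 0
        (by unfold rowF; rw [if_pos hlast])
      rw [hcb]
      have ht : tAt size i (j : Int) = tAt size i ((j : Int) + 1) := by
        unfold tAt
        rw [if_neg (by omega), if_pos (by omega)]
        ring
      rw [← ht]
    · rw [if_neg hlast]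
      have htj : tAt size i (j : Int) = i * size + (j : Int) + 1 := by
        unfold tAt; rw [if_neg (by omega)]; ring
      have hcb := cbRow_update size i (j : Int) h0 hi (by omega) hjlt (tAt size i (j : Int))
        (by unfold rowF; rw [if_neg hlast, htj])
      rw [hcb]
      have ht : tAt size i (j : Int) + 1 = tAt size i ((j : Int) + 1) := by
        unfold tAt
        rw [if_neg (by omega), if_neg (by intro h; exact hlast ⟨h.1, by omega⟩)]
        ring
      rw [ht]

lemma cbAt_eq_cbRowAt_zero (size i : Int) : cbAt size i = cbRowAt size i 0 := by
  unfold cbAt cbRowAt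
  apply List.map_congr_left
  intro x hx
  by_cases h : x < i
  · simp [h]
  · rw [if_neg h, if_neg h]
    by_cases h2 : x = i
    · rw [if_pos h2, rowAt_zero]
    · rw [if_neg h2]

lemma cbRowAt_full (size i : Int) (_h0 : 0 ≤ i) (_hi : i < size) :
    cbRowAt size i size = cbAt size (i + 1) := by
  unfold cbAt cbRowAt
  apply List.map_congr_left
  intro x hx
  rw [PySem.List.mem_pyRange_one] at hx
  by_cases h : x < i
  · rw [if_pos h, if_pos (by omega)]
  · rw [if_neg h]
    by_cases h2 : x = i
    · rw [if_pos h2, if_pos (by omega), h2]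
      unfold rowAt
      apply List.map_congr_left
      intro y hy
      rw [PySem.List.mem_pyRange_one] at hy
      rw [if_pos (by omega)]
    · rw [if_neg h2, if_neg (by omega)]

lemma build_row (size i : Int) (h0 : 0 ≤ i) (hi : i < size) :
    pvBuildRow size i (cbAt size i, i * size + 1)
      = (cbAt size (i + 1), (i + 1) * size + 1 - (if i + 1 = size then 1 else 0)) := by
  have hpos : 0 < size := by omega
  have hsz : ((size.toNat : Nat) : Int) = size := Int.toNat_of_nonneg hpos.le
  unfold pvBuildRow
  rw [show PySem.List.pyRange 0 size 1 = PySem.List.pyRange 0 ((size.toNat : Nat) : Int) 1 by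
        rw [hsz]]
  have h1 : cbAt size i = cbRowAt size i 0 := cbAt_eq_cbRowAt_zero size i
  have h2 : i * size + 1 = tAt size i 0 := by
    unfold tAt; rw [if_neg (by omega)]; ring
  rw [h1, h2, build_row_step size i h0 hi size.toNat (by omega), hsz]
  rw [cbRowAt_full size i h0 hi]
  congr 1
  unfold tAt
  by_cases h : i + 1 = size
  · rw [if_pos (by omega), if_pos h]; ring
  · rw [if_neg (by omega), if_neg h]; ring

lemma build_loop (size : Int) (hpos : 0 < size) (m : Nat) (hm : (m : Int) ≤ size) :
    (PySem.List.pyRange 0 (m : Int) 1).foldl (fun st i => pvBuildRow size i st)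
      ((PySem.List.pyRange 0 size 1).map (fun _ => List.replicate size.toNat 0), 1)
      = (cbAt size m, (m : Int) * size + 1 - (if (m : Int) = size then 1 else 0)) := by
  induction m with
  | zero =>
    rw [show ((0 : Nat) : Int) = 0 by norm_num,
        show PySem.List.pyRange 0 0 1 = [] from PySem.List.pyRange_one_eq_nil (by omega)]
    simp only [List.foldl_nil]
    apply congrArg₂ Prod.mk
    · unfold cbAt
      apply Eq.symm
      apply List.map_congr_left
      intro x hx
      rw [PySem.List.mem_pyRange_one] at hx
      rw [if_neg (by omega)]
    · rw [if_neg (by omega)]; ring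
  | succ m ih =>
    have hm' : (m : Int) ≤ size := by push_cast at hm ⊢; omega
    have hmlt : (m : Int) < size := by push_cast at hm; omega
    rw [show ((m + 1 : Nat) : Int) = (m : Int) + 1 by push_cast; ring,
        PySem.List.pyRange_one_succ_right (by omega), List.foldl_append, ih hm']
    simp only [List.foldl_cons, List.foldl_nil]
    rw [show (m : Int) * size + 1 - (if (m : Int) = size then 1 else 0) = (m : Int) * size + 1 by
          rw [if_neg (by omega)]; ring]
    exact build_row size (m : Int) (by omega) hmlt

lemma build_eq (size : Int) (hpos : 0 < size) :
    pvBuild size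
      = (PySem.List.pyRange 0 size 1).map (fun i => (PySem.List.pyRange 0 size 1).map (rowF size i)) := by
  have hsz : ((size.toNat : Nat) : Int) = size := Int.toNat_of_nonneg hpos.le
  unfold pvBuild
  have hb := build_loop size hpos size.toNat (by omega)
  rw [hsz] at hb
  rw [hb]
  unfold cbAt
  apply List.map_congr_left
  intro x hx
  rw [PySem.List.mem_pyRange_one] at hx
  rw [if_pos (by omega)]

lemma build_get (size i j : Int) (h0 : 0 ≤ i) (hi : i < size) (h0' : 0 ≤ j) (hj : j < size) :
    PySem.List.pyGetD (PySem.List.pyGetD (pvBuild size) i []) j 0 = rowF size i j := by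
  rw [build_eq size (by omega), PySem.List.pyGetD_map_pyRange_of_nonneg _ _ _ _ h0 hi,
      PySem.List.pyGetD_map_pyRange_of_nonneg _ _ _ _ h0' hj]

-- generic: early-exit fold over options is findSome?
lemma foldl_keep_some {α β : Type} (l : List α) (g : α → Option β) (r : β) :
    l.foldl (fun acc x => if acc.isSome then acc else g x) (some r) = some r := by
  induction l with
  | nil => rfl
  | cons x xs ih => simpa using ih

lemma foldl_none_findSome {α β : Type} (l : List α) (g : α → Option β) :
    l.foldl (fun acc x => if acc.isSome then acc else g x) none = l.findSome? g := by
  induction l with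
  | nil => rfl
  | cons x xs ih =>
    simp only [List.foldl_cons, List.findSome?_cons]
    cases hg : g x with
    | none => simpa [hg] using ih
    | some b => simp [foldl_keep_some]

lemma findSome?_unique {α β : Type} (l : List α) (g : α → Option β) (a : α) (b : β)
    (ha : a ∈ l) (hb : g a = some b) (hu : ∀ x ∈ l, g x ≠ none → x = a) :
    l.findSome? g = some b := by
  induction l with
  | nil => cases ha
  | cons x xs ih =>
    simp only [List.findSome?_cons]
    cases hg : g x with
    | some c =>
      have hx : x = a := hu x (List.mem_cons_self) (by simp [hg])
      rw [hx] at hg; rw [hb] at hg; simpa using hg.symm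
    | none =>
      have ha' : a ∈ xs := by
        rcases List.mem_cons.1 ha with h | h
        · exfalso; rw [h] at hb; rw [hb] at hg; cases hg
        · exact h
      exact ih ha' (fun y hy => hu y (List.mem_cons_of_mem _ hy))

lemma cell_value_bounds (size x y : Int) (hx0 : 0 ≤ x) (hx : x < size) (hy0 : 0 ≤ y)
    (hy : y < size) (hne : ¬(x = size - 1 ∧ y = size - 1)) :
    1 ≤ x * size + y + 1 ∧ x * size + y + 1 ≤ size * size - 1 := by
  constructor
  · nlinarith
  · rcases lt_or_eq_of_le (by omega : x ≤ size - 1) with h | h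
    · nlinarith
    · have h2 : ¬ y = size - 1 := fun hy' => hne ⟨h, hy'⟩
      have hy2 : y ≤ size - 2 := by omega
      nlinarith

-- what B computes as the goal position of value v (size ≥ 1)
def posB (size v : Int) : Option (Int × Int) :=
  if v = 0 then some (size - 1, size - 1)
  else if 1 ≤ v ∧ v ≤ size * size - 1 then
    some (PySem.Int.floordiv (v - 1) size, PySem.Int.mod (v - 1) size)
  else none

lemma find_eq_posB (size v : Int) (hpos : 0 < size) :
    pvFindPos (pvBuild size) size v = posB size v := by
  have hcong : pvFindPos (pvBuild size) size v
      = (PySem.List.pyRange 0 size 1).findSome? (fun x =>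
          (PySem.List.pyRange 0 size 1).findSome? (fun y =>
            if rowF size x y = v then some (x, y) else none)) := by
    unfold pvFindPos
    rw [PySem.List.foldl_congr_mem _ _ (fun acc x =>
      if acc.isSome then acc else (PySem.List.pyRange 0 size 1).findSome? (fun y =>
          if rowF size x y = v then some (x, y) else none)) _ ?_]
    · exact foldl_none_findSome (PySem.List.pyRange 0 size 1) (fun x =>
        (PySem.List.pyRange 0 size 1).findSome? (fun y =>
          if rowF size x y = v then some (x, y) else none))
    · intro acc x hx
      cases acc with
      | some r => rfl
      | none =>
        show _ = (PySem.List.pyRange 0 size 1).findSome? _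
        rw [PySem.List.foldl_congr_mem _ _ (fun acc2 y =>
          if acc2.isSome then acc2
          else if rowF size x y = v then some (x, y) else none) _ ?_]
        · exact foldl_none_findSome (PySem.List.pyRange 0 size 1)
            (fun y => if rowF size x y = v then some (x, y) else none)
        · intro acc2 y hy
          cases acc2 with
          | some r => rfl
          | none =>
            rw [PySem.List.mem_pyRange_one] at hx hy
            show (if PySem.List.pyGetD (PySem.List.pyGetD (pvBuild size) x []) y 0 = v
                  then some (x, y) else none)
              = if (none : Option (Int × Int)).isSome then none
                else if rowF size x y = v then some (x, y) else none
            rw [build_get size x y hx.1 hx.2 hy.1 hy.2]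
            rfl
  rw [hcong]
  unfold posB
  by_cases hv0 : v = 0
  · subst hv0
    rw [if_pos rfl]
    apply findSome?_unique _ _ (size - 1) (size - 1, size - 1)
    · rw [PySem.List.mem_pyRange_one]; omega
    · apply findSome?_unique _ _ (size - 1) (size - 1, size - 1)
      · rw [PySem.List.mem_pyRange_one]; omega
      · rw [show rowF size (size - 1) (size - 1) = 0 by unfold rowF; rw [if_pos ⟨rfl, rfl⟩],
            if_pos rfl]
      · intro y hy hne
        rw [PySem.List.mem_pyRange_one] at hy
        by_contra hyne
        apply hne
        rw [if_neg]
        unfold rowF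
        rw [if_neg (fun h => hyne h.2)]
        have := cell_value_bounds size (size - 1) y (by omega) (by omega) hy.1 hy.2
          (fun h => hyne h.2)
        omega
    · intro x hx hne
      rw [PySem.List.mem_pyRange_one] at hx
      by_contra hxne
      apply hne
      rw [List.findSome?_eq_none_iff]
      intro y hy
      rw [PySem.List.mem_pyRange_one] at hy
      rw [if_neg]
      unfold rowF
      rw [if_neg (fun h => hxne h.1)]
      have := cell_value_bounds size x y hx.1 hx.2 hy.1 hy.2 (fun h => hxne h.1)
      omega
  · by_cases hv1 : 1 ≤ v ∧ v ≤ size * size - 1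
    · rw [if_neg hv0, if_pos hv1]
      have hcj0 : 0 ≤ PySem.Int.mod (v - 1) size := PySem.Int.mod_nonneg _ hpos
      have hcjs : PySem.Int.mod (v - 1) size < size := PySem.Int.mod_lt _ hpos
      have hsum : PySem.Int.floordiv (v - 1) size * size + PySem.Int.mod (v - 1) size = v - 1 :=
        PySem.Int.floordiv_mul_add_mod (v - 1) size
      have hci0 : 0 ≤ PySem.Int.floordiv (v - 1) size := by
        rw [PySem.Int.le_floordiv_iff_mul_le hpos]; nlinarith [hv1.1]
      have hcis : PySem.Int.floordiv (v - 1) size < size := by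
        rw [PySem.Int.floordiv_lt_iff_lt_mul hpos]; nlinarith [hv1.2]
      have hnotlast : ¬(PySem.Int.floordiv (v - 1) size = size - 1 ∧
          PySem.Int.mod (v - 1) size = size - 1) := by
        rintro ⟨e1, e2⟩
        rw [e1, e2] at hsum
        nlinarith [hv1.2]
      apply findSome?_unique _ _ (PySem.Int.floordiv (v - 1) size)
      · rw [PySem.List.mem_pyRange_one]; omega
      · apply findSome?_unique _ _ (PySem.Int.mod (v - 1) size)
        · rw [PySem.List.mem_pyRange_one]; omega
        · rw [show rowF size (PySem.Int.floordiv (v - 1) size) (PySem.Int.mod (v - 1) size) = v by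
                unfold rowF; rw [if_neg hnotlast]; linarith [hsum], if_pos rfl]
        · intro y hy hne
          rw [PySem.List.mem_pyRange_one] at hy
          by_cases h : rowF size (PySem.Int.floordiv (v - 1) size) y = v
          · unfold rowF at h
            split_ifs at h with hl
            · omega
            · linear_combination h - hsum
          · exact absurd (if_neg h) hne
      · intro x hx hne
        rw [PySem.List.mem_pyRange_one] at hx
        rw [Ne, List.findSome?_eq_none_iff] at hne
        push Not at hne
        obtain ⟨y, hy, hyne⟩ := hne
        rw [PySem.List.mem_pyRange_one] at hy
        by_cases h : rowF size x y = v
        · unfold rowF at h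
          split_ifs at h with hl
          · omega
          · have hx1s : (x + 1) * size = x * size + size := by ring
            have : PySem.Int.floordiv (v - 1) size = x :=
              (PySem.Int.floordiv_eq_iff_of_pos hpos).mpr ⟨by linarith, by linarith⟩
            exact this.symm
        · exact absurd (if_neg h) hyne
    · rw [if_neg hv0, if_neg hv1]
      rw [List.findSome?_eq_none_iff]
      intro x hx
      rw [List.findSome?_eq_none_iff]
      intro y hy
      rw [PySem.List.mem_pyRange_one] at hx hy
      rw [if_neg]
      unfold rowF
      split_ifs with hl
      · omega
      · have := cell_value_bounds size x y hx.1 hx.2 hy.1 hy.2 hl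
        intro h
        exact hv1 ⟨by linarith, by linarith⟩

-- generic: a pair-state foldl whose component sum advances like a scalar foldl
lemma foldl_pair_sum {α : Type} (l : List α) (f : Int × Int → α → Int × Int)
    (g : Int → α → Int)
    (h : ∀ st x, x ∈ l → (f st x).1 + (f st x).2 = g (st.1 + st.2) x) :
    ∀ st : Int × Int, (l.foldl f st).1 + (l.foldl f st).2 = l.foldl g (st.1 + st.2) := by
  induction l with
  | nil => intro st; rfl
  | cons x xs ih =>
    intro st
    simp only [List.foldl_cons]
    rw [ih (fun st y hy => h st y (List.mem_cons_of_mem _ hy)) (f st x),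
        h st x List.mem_cons_self]

-- ===== VERDICT (by name: the statement is the Claim_ definition above) =====
theorem misplaced_tiles_with_constraints_spec : Claim_equal_misplaced_tiles_with_constraints := by
  intro board size hdom hpre
  unfold Spec_misplaced_tiles_with_constraints misplaced_tiles_with_constraints
    misplaced_tiles_with_constraints_alt
  dsimp only
  refine foldl_pair_sum _ _ _ ?_ (0, 0)
  intro st p hp
  refine foldl_pair_sum _ _ _ ?_ st
  intro st' q hq
  rcases (PySem.List.mem_enumerate_iff p.2 0 q).mp hq with ⟨m, hm, hqe⟩
  have hrow : p.2 ≠ [] := by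
    intro h; rw [h] at hm; simp at hm
  have hb := hpre p hp hrow
  rcases (PySem.List.mem_enumerate_iff board 0 p).mp hp with ⟨k, hk, hpe⟩
  have hp0 : 0 ≤ p.1 := by rw [hpe]; simp
  have hq0 : 0 ≤ q.1 := by rw [hqe]; simp
  have hqs : q.1 < size := by
    have : q.1 = (m : Int) := by rw [hqe]; simp
    omega
  have hsz : 0 < size := by omega
  rw [build_get size p.1 q.1 hp0 hb.1 hq0 hqs, find_eq_posB size q.2 hsz]
  unfold rowF posB
  by_cases hmis : q.2 = if p.1 = size - 1 ∧ q.1 = size - 1 then 0 else p.1 * size + q.1 + 1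
  · rw [if_neg (not_not_intro hmis), if_neg (not_not_intro hmis)]
  · rw [if_pos hmis, if_pos hmis]
    by_cases h0 : q.2 = 0
    · rw [if_pos h0, if_pos h0]
      dsimp only
      ring
    · rw [if_neg h0, if_neg h0]
      by_cases h1 : 1 ≤ q.2 ∧ q.2 ≤ size * size - 1
      · rw [if_pos h1, if_pos h1]
        dsimp only
        ring
      · rw [if_neg h1, if_neg h1]
        dsimp only
        ring
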